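-- pv_equiv track=rewrite | github.com/bhuvanshashank04/codemind-python | Self_Dividing_Numbers.py | prnt
-- ===== SOURCE A (Python) =====
-- def prnt(n):
--     temp=n
--     cnt=0
--     s=str(temp)
--     l=len(s)
--     while n>0:
--         r=n%10
--         if r==0:
--             break
--         elif temp%r==0:
--             cnt+=1
--         n=n//10
--     if cnt==l:
--         return True
--     else:
--         return False
-- ===== SOURCE B (Python) =====
-- def _gcd(a, b):
--     return a if b == 0 else _gcd(b, a % b)
--
-- def prnt(n):
--     if n <= 0:
--         return False
--     L = 1
--     m = n
--     while m > 0: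
--         d = m % 10
--         if d == 0:
--             return False
--         L = L * d // _gcd(L, d)
--         m //= 10
--     return n % L == 0
-- ===== Notes on version B (the rewrite author's own statement) =====
-- stated objective: alternative
-- what changed: Instead of testing each digit's divisibility into n and counting matches against len(str(n)), B accumulates the lcm of the digits (via Euclid's gcd) while extracting them, rejects a zero digit immediately, and performs a single final divisibility test n % lcm == 0.
import Mathlib
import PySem

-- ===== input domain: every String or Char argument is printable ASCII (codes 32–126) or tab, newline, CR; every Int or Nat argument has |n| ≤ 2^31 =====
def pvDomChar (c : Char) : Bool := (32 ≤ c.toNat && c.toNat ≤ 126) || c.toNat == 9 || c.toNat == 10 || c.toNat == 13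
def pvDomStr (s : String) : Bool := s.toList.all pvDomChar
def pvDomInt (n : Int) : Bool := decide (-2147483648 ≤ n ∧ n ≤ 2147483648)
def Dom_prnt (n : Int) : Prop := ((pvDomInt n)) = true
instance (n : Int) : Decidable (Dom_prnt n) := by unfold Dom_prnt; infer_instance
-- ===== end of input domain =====

-- B replaces A's per-digit divisibility tests counted against len(str(n)) by accumulating
-- the lcm of the digits (Euclid's gcd) and doing ONE final divisibility test (objective: alternative).

-- ===== PORT A =====
-- termination fact for the digit loops (cited by the ports)
lemma pyDiv10_toNat_lt (m : Int) (h : m > 0) : (PySem.Int.floordiv m 10).toNat < m.toNat := by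
  have h10 : PySem.Int.floordiv m 10 = m / 10 := PySem.Int.floordiv_eq_ediv_of_pos (by omega)
  rw [h10]; omega

-- the while loop of A: state (n, cnt), temp fixed; stops on n ≤ 0 or on a zero digit
def prntLoop (temp : Int) (m : Int) (cnt : Int) : Int :=
  if h : m > 0 then
    let r := PySem.Int.mod m 10
    if r = 0 then cnt
    else prntLoop temp (PySem.Int.floordiv m 10)
           (if PySem.Int.mod temp r = 0 then cnt + 1 else cnt)
  else cnt
termination_by m.toNat
decreasing_by exact pyDiv10_toNat_lt m h

def prnt (n : Int) : Bool :=
  let temp := n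
  let s := PySem.Int.toStr temp
  let l := PySem.Str.len s
  let cnt := prntLoop temp n 0
  cnt == l

-- ===== PORT B =====
-- termination fact for the Euclid recursion of Source B's _gcd (cited by the port)
lemma pyMod_natAbs_lt (a b : Int) (hb : b ≠ 0) : (PySem.Int.mod a b).natAbs < b.natAbs := by
  rcases lt_or_gt_of_ne hb with h | h
  · have := PySem.Int.mod_neg_bounds a h
    omega
  · have h1 := PySem.Int.mod_nonneg a h
    have h2 := PySem.Int.mod_lt a h
    omega

-- _gcd(a, b) = a if b == 0 else _gcd(b, a % b)
def gcdInt (a b : Int) : Int :=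
  if h : b = 0 then a else gcdInt b (PySem.Int.mod a b)
termination_by b.natAbs
decreasing_by exact pyMod_natAbs_lt a b h

-- the while loop of B: state (m, L); 'return False' inside the loop is modelled as none
def prntAltLoop (m : Int) (L : Int) : Option Int :=
  if h : m > 0 then
    let d := PySem.Int.mod m 10
    if d = 0 then none
    else prntAltLoop (PySem.Int.floordiv m 10) (PySem.Int.floordiv (L * d) (gcdInt L d))
  else some L
termination_by m.toNat
decreasing_by exact pyDiv10_toNat_lt m h

def prnt_alt (n : Int) : Bool :=
  if n ≤ 0 then false
  else
    match prntAltLoop n 1 with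
    | none => false
    | some L => PySem.Int.mod n L == 0

-- ===== PRECONDITION & SPEC =====
def Spec_prnt (n : Int) (out : Bool) : Prop := out = prnt_alt n
instance (n : Int) (out : Bool) : Decidable (Spec_prnt n out) := by unfold Spec_prnt; infer_instance

-- ===== CLAIM (what is proved, stated in full; the proofs are below) =====
def Claim_equal_prnt : Prop := ∀ (n : Int), Dom_prnt n → Spec_prnt n (prnt n)

-- ===== LEMMAS AND PROOFS =====

-- ---- A's loop, read off the (little-endian) digit list ----
def cntOf (temp : Int) : List Nat → Int → Int
  | [], cnt => cnt
  | d :: ds, cnt =>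
      if d = 0 then cnt
      else cntOf temp ds (if PySem.Int.mod temp (d : Int) = 0 then cnt + 1 else cnt)

lemma prntLoop_eq_cntOf (temp : Int) : ∀ (m : Nat) (cnt : Int),
    prntLoop temp (m : Int) cnt = cntOf temp (Nat.digits 10 m) cnt := by
  intro m
  induction m using Nat.strong_induction_on with
  | _ m ih =>
    intro cnt
    rcases Nat.eq_zero_or_pos m with hm | hm
    · subst hm
      rw [prntLoop]
      simp [cntOf]
    · rw [prntLoop]
      have hpos : (m : Int) > 0 := by exact_mod_cast hm
      rw [dif_pos hpos]
      have hmod : PySem.Int.mod (m : Int) 10 = ((m % 10 : Nat) : Int) := by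
        rw [PySem.Int.mod_eq_emod_of_pos (by omega)]; push_cast; rfl
      have hdiv : PySem.Int.floordiv (m : Int) 10 = ((m / 10 : Nat) : Int) := by
        rw [PySem.Int.floordiv_eq_ediv_of_pos (by omega)]; push_cast; rfl
      rw [Nat.digits_def' (by norm_num : (1:Nat) < 10) hm]
      by_cases hz : m % 10 = 0
      · rw [hmod, hz]; norm_num [cntOf]
      · have hz' : ((m % 10 : Nat) : Int) ≠ 0 := by exact_mod_cast hz
        rw [hmod, if_neg hz', hdiv, ih (m / 10) (Nat.div_lt_self hm (by omega))]
        simp [cntOf, hz]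

lemma cntOf_le (temp : Int) : ∀ (ds : List Nat) (cnt : Int),
    cntOf temp ds cnt ≤ cnt + ds.length := by
  intro ds
  induction ds with
  | nil => intro cnt; simp [cntOf]
  | cons d ds ih =>
    intro cnt
    by_cases hd : d = 0
    · simp [cntOf, hd]; omega
    · simp only [cntOf, if_neg hd, List.length_cons]
      by_cases hm : PySem.Int.mod temp (d : Int) = 0
      · rw [if_pos hm]; have := ih (cnt + 1); push_cast; omega
      · rw [if_neg hm]; have := ih cnt; push_cast; omega

lemma cntOf_eq_iff (temp : Int) : ∀ (ds : List Nat) (cnt : Int),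
    cntOf temp ds cnt = cnt + ds.length ↔
      ∀ d ∈ ds, d ≠ 0 ∧ PySem.Int.mod temp (d : Int) = 0 := by
  intro ds
  induction ds with
  | nil => intro cnt; simp [cntOf]
  | cons d ds ih =>
    intro cnt
    by_cases hd : d = 0
    · subst hd
      simp [cntOf]
      omega
    · simp only [cntOf, if_neg hd, List.length_cons]
      by_cases hm : PySem.Int.mod temp (d : Int) = 0
      · rw [if_pos hm]
        have := ih (cnt + 1)
        constructor
        · intro h e he
          rcases List.mem_cons.mp he with rfl | he'
          · exact ⟨hd, hm⟩
          · exact (this.mp (by push_cast at h ⊢; omega)) e he'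
        · intro h
          have h' := this.mpr (fun e he => h e (List.mem_cons_of_mem _ he))
          push_cast at h' ⊢; omega
      · rw [if_neg hm]
        constructor
        · intro h
          have := cntOf_le temp ds cnt
          push_cast at h; omega
        · intro h; exact absurd (h d (by simp)).2 hm

-- ---- Nat.toDigits via Nat.digits (big-endian character list), for positive numbers ----
lemma toDigitsCore_eq_digits : ∀ (fuel m : Nat) (acc : List Char), 0 < m → m ≤ fuel →
    Nat.toDigitsCore 10 fuel m acc = ((Nat.digits 10 m).map Nat.digitChar).reverse ++ acc := by
  intro fuel
  induction fuel with
  | zero => intro m acc hm hf; omega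
  | succ fuel ih =>
    intro m acc hm hf
    rw [Nat.toDigitsCore]
    rw [Nat.digits_def' (by norm_num : (1:Nat) < 10) hm]
    by_cases hz : m / 10 = 0
    · have : Nat.digits 10 (m / 10) = [] := by rw [hz]; simp
      simp [hz]
    · rw [if_neg hz]
      rw [ih (m / 10) _ (Nat.pos_of_ne_zero hz) (by omega)]
      simp

lemma toChars_pos (n : Int) (hn : 0 < n) :
    PySem.Int.toChars n = ((Nat.digits 10 n.toNat).map Nat.digitChar).reverse := by
  have hnt : 0 < n.toNat := by omega
  rw [PySem.Int.toChars, if_neg (by omega), Nat.toDigits,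
      toDigitsCore_eq_digits (n.toNat + 1) n.toNat [] hnt (by omega)]
  simp

lemma toChars_len_pos (n : Int) : 0 < (PySem.Int.toChars n).length := by
  rcases lt_trichotomy n 0 with h | h | h
  · rw [PySem.Int.toChars, if_pos h]; simp
  · subst h; decide
  · rw [toChars_pos n h]
    have := Nat.digits_ne_nil_iff_ne_zero (b := 10) (n := n.toNat) |>.mpr (by omega)
    simp [List.length_reverse]
    exact List.length_pos_iff.mpr (by simpa using this)

-- ---- B's gcd recursion computes Nat.gcd on naturals ----
lemma gcdInt_natCast : ∀ (b a : Nat), gcdInt (a : Int) (b : Int) = (Nat.gcd a b : Int) := by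
  intro b
  induction b using Nat.strong_induction_on with
  | _ b ih =>
    intro a
    rcases Nat.eq_zero_or_pos b with hb | hb
    · subst hb; rw [gcdInt]; simp
    · rw [gcdInt]
      have hb' : (b : Int) ≠ 0 := by exact_mod_cast Nat.pos_iff_ne_zero.mp hb
      rw [dif_neg hb', PySem.Int.mod_natCast a b, ih (a % b) (Nat.mod_lt a hb)]
      rw [Nat.gcd_comm b (a % b), ← Nat.gcd_rec, Nat.gcd_comm]

-- ---- B's lcm step computes Nat.lcm on naturals ----
lemma lcm_step_natCast (a b : Nat) :
    PySem.Int.floordiv ((a : Int) * (b : Int)) (gcdInt (a : Int) (b : Int))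
      = (Nat.lcm a b : Int) := by
  rw [gcdInt_natCast]
  have : (a : Int) * (b : Int) = ((a * b : Nat) : Int) := by push_cast; ring
  rw [this, PySem.Int.floordiv_natCast]
  rfl

-- ---- B's loop, read off the (little-endian) digit list ----
def lcmOf : List Nat → Nat → Option Nat
  | [], L => some L
  | d :: ds, L => if d = 0 then none else lcmOf ds (Nat.lcm L d)

lemma prntAltLoop_eq_lcmOf : ∀ (m : Nat) (L : Nat),
    prntAltLoop (m : Int) (L : Int) = Option.map (fun k : Nat => (k : Int)) (lcmOf (Nat.digits 10 m) L) := by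
  intro m
  induction m using Nat.strong_induction_on with
  | _ m ih =>
    intro L
    rcases Nat.eq_zero_or_pos m with hm | hm
    · subst hm; rw [prntAltLoop]; simp [lcmOf]
    · rw [prntAltLoop]
      have hpos : (m : Int) > 0 := by exact_mod_cast hm
      rw [dif_pos hpos]
      have hmod : PySem.Int.mod (m : Int) 10 = ((m % 10 : Nat) : Int) :=
        PySem.Int.mod_natCast m 10
      have hdiv : PySem.Int.floordiv (m : Int) 10 = ((m / 10 : Nat) : Int) :=
        PySem.Int.floordiv_natCast m 10
      rw [Nat.digits_def' (by norm_num : (1:Nat) < 10) hm]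
      by_cases hz : m % 10 = 0
      · rw [hmod, hz]; norm_num [lcmOf]
      · have hz' : ((m % 10 : Nat) : Int) ≠ 0 := by exact_mod_cast hz
        rw [hmod, if_neg hz', hdiv, lcm_step_natCast L (m % 10),
            ih (m / 10) (Nat.div_lt_self hm (by omega))]
        simp [lcmOf, hz]

lemma lcmOf_none_of_mem_zero : ∀ (ds : List Nat) (L : Nat), 0 ∈ ds → lcmOf ds L = none := by
  intro ds
  induction ds with
  | nil => intro L h; simp at h
  | cons d ds ih =>
    intro L h
    by_cases hd : d = 0
    · simp [lcmOf, hd]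
    · rcases List.mem_cons.mp h with h0 | h0
      · exact absurd h0.symm hd
      · simp [lcmOf, hd, ih _ h0]

lemma lcmOf_dvd_iff : ∀ (ds : List Nat) (L : Nat), 0 ∉ ds →
    ∃ M, lcmOf ds L = some M ∧ ∀ k, (M ∣ k ↔ L ∣ k ∧ ∀ d ∈ ds, d ∣ k) := by
  intro ds
  induction ds with
  | nil => intro L _; exact ⟨L, rfl, fun k => by simp⟩
  | cons d ds ih =>
    intro L h
    have hd : d ≠ 0 := fun h0 => h (by simp [h0])
    obtain ⟨M, hM, hiff⟩ := ih (Nat.lcm L d) (fun h0 => h (List.mem_cons_of_mem _ h0))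
    refine ⟨M, by simp [lcmOf, hd, hM], fun k => ?_⟩
    rw [hiff k, Nat.lcm_dvd_iff]
    constructor
    · rintro ⟨⟨h1, h2⟩, h3⟩
      exact ⟨h1, fun e he => by rcases List.mem_cons.mp he with rfl | he' <;> [exact h2; exact h3 e he']⟩
    · rintro ⟨h1, h2⟩
      exact ⟨⟨h1, h2 d (by simp)⟩, fun e he => h2 e (List.mem_cons_of_mem _ he)⟩

-- mod-by-digit as divisibility over Nat (n > 0, digit d)
lemma mod_digit_zero_iff (n : Int) (hn : 0 < n) (d : Nat) :
    PySem.Int.mod n (d : Int) = 0 ↔ d ∣ n.toNat := by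
  rw [PySem.Int.mod_eq_zero_iff_dvd]
  constructor
  · intro h
    have : ((d : Int) ∣ ((n.toNat : Nat) : Int)) := by
      rwa [Int.toNat_of_nonneg (by omega)]
    exact_mod_cast this
  · intro h
    have : ((d : Int) ∣ ((n.toNat : Nat) : Int)) := by exact_mod_cast h
    rwa [Int.toNat_of_nonneg (by omega)] at this

-- ===== VERDICT (by name: the statement is the Claim_ definition above) =====
theorem prnt_spec : Claim_equal_prnt := by
  intro n _
  unfold Spec_prnt
  simp only [prnt, prnt_alt]
  by_cases hn : n ≤ 0
  · -- A's loop never runs: cnt = 0 < len(str(n)), so A returns false; B's guard returns false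
    rw [if_pos hn]
    have hloop : prntLoop n n 0 = 0 := by rw [prntLoop]; rw [dif_neg (by omega)]
    have hl : 0 < (PySem.Int.toChars n).length := toChars_len_pos n
    rw [hloop]
    simp only [PySem.Str.len_eq, PySem.Int.toList_toStr, beq_eq_false_iff_ne, ne_eq]
    omega
  · have hn' : 0 < n := by omega
    rw [if_neg hn]
    have hcast : ((n.toNat : Nat) : Int) = n := Int.toNat_of_nonneg (by omega)
    have hA := prntLoop_eq_cntOf n n.toNat 0
    rw [hcast] at hA
    have hB := prntAltLoop_eq_lcmOf n.toNat 1
    rw [hcast, Nat.cast_one] at hB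
    have hlen : PySem.Str.len (PySem.Int.toStr n) = ((Nat.digits 10 n.toNat).length : Int) := by
      rw [PySem.Str.len_eq, PySem.Int.toList_toStr, toChars_pos n hn']; simp
    rw [hA, hlen, hB]
    set ds := Nat.digits 10 n.toNat with hds
    by_cases h0 : 0 ∈ ds
    · -- a zero digit: B gives none → false, and A's count falls short
      rw [lcmOf_none_of_mem_zero ds 1 h0]
      have hne : ¬ (cntOf n ds 0 = 0 + (ds.length : Int)) := by
        rw [cntOf_eq_iff]
        intro hfa
        exact (hfa 0 h0).1 rfl
      simp only [Option.map_none]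
      simp only [beq_eq_false_iff_ne, ne_eq]
      omega
    · obtain ⟨M, hM, hiff⟩ := lcmOf_dvd_iff ds 1 h0
      rw [hM]
      simp only [Option.map_some]
      have hAiff : cntOf n ds 0 = 0 + (ds.length : Int) ↔ ∀ d ∈ ds, d ∣ n.toNat := by
        rw [cntOf_eq_iff]
        constructor
        · intro h d hd
          exact (mod_digit_zero_iff n hn' d).mp (h d hd).2
        · intro h d hd
          exact ⟨fun hz => h0 (hz ▸ hd), (mod_digit_zero_iff n hn' d).mpr (h d hd)⟩
      rw [zero_add] at hAiff
      have hBiff : PySem.Int.mod n (M : Int) = 0 ↔ ∀ d ∈ ds, d ∣ n.toNat := by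
        rw [mod_digit_zero_iff n hn' M, hiff n.toNat]
        simp
      rw [Bool.eq_iff_iff, beq_iff_eq, beq_iff_eq, hAiff, hBiff]
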